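-- pv_equiv track=rewrite | github.com/Sandy4321/AI-Agents-Beyond-Illusion | agent/ai_agent.py | get_ancestor_titles
-- ===== SOURCE A (Python) =====
-- def _parent_number(num: str) -> str | None:
--     """Return the parent node number (e.g. '3.1.2' → '3.1'), or None for root."""
--     parts = num.split(".")
--     if len(parts) <= 1:
--         return None
--     return ".".join(parts[:-1])
--
-- def get_ancestor_titles(node_number: str, nodes_lookup: dict) -> list[str]:
--     """
--     Walk up the hierarchy collecting title strings from root down.
--     E.g. for node '3.1.2.1':  ['Menu Offerings', 'Build-Your-Own Pizza',
--                                 'Crust Options', 'Regular Crust – Included']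
--     """
--     chain: list[str] = []
--     current = node_number
--     while current is not None:
--         node = nodes_lookup.get(current)
--         if node:
--             chain.append(node.get("title", ""))
--         current = _parent_number(current)
--     chain.reverse()  # root → leaf order
--     return chain
-- ===== SOURCE B (Python) =====
-- def get_ancestor_titles(node_number: str, nodes_lookup: dict) -> list[str]:
--     """Single forward pass: build each dotted prefix root-first and collect its
--     title, so no parent helper and no final reverse are needed."""
--     parts = node_number.split(".")
--     chain: list[str] = []
--     for i in range(1, len(parts) + 1):
--         node = nodes_lookup.get(".".join(parts[:i]))
--         if node:
--             chain.append(node.get("title", ""))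
--     return chain
-- ===== Notes on version B (the rewrite author's own statement) =====
-- stated objective: simpler
-- what changed: Replaces A's leaf-to-root parent-walk (repeated split/join in a _parent_number helper, then a final reverse) by a single forward loop over the dotted prefixes of node_number built shortest-first, which yields root-to-leaf order directly.
import Mathlib
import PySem

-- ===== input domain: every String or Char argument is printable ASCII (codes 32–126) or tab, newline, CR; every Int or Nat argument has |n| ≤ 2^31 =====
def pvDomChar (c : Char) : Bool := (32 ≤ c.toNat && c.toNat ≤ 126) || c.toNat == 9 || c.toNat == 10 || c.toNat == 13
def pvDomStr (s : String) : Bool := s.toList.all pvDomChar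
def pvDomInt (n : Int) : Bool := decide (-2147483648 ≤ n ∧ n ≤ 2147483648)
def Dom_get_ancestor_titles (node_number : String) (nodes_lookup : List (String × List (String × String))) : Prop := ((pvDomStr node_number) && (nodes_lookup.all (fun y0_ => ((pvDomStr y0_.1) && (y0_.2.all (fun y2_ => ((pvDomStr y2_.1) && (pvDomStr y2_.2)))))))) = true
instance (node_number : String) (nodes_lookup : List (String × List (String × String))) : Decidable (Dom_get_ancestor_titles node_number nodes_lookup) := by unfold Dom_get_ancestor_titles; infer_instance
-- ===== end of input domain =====

-- B replaces A's leaf→root parent-walk plus final reverse by one forward pass over the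
-- dotted prefixes of node_number (root-first), dropping the _parent_number helper; objective: simpler.

-- ===== PORT A =====
-- shared helper: s.split(".") — exact because the separator is the non-empty literal "."
def pySplitDot (s : String) : List String :=
  (PySem.Chars.splitOn s.toList ['.']).map String.ofList

-- shared helper: nodes_lookup.get(k) (first-match association-list lookup, Python dict semantics)
def pvLookup (nodes_lookup : List (String × List (String × String))) (k : String) :
    Option (List (String × String)) :=
  (PySem.Dict.mk nodes_lookup).get? k

-- bridge (used by the termination argument of pvWalk): PySem's fuel-based splitter on the
-- one-character separator "." is Mathlib's List.splitOn '.'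
theorem pvGo (fuel : Nat) : ∀ (l cur : List Char) (acc : List (List Char)), l.length < fuel →
    PySem.Chars.splitOn.go ['.'] fuel l cur acc
      = acc.reverse ++ (List.splitOn '.' l).modifyHead (cur.reverse ++ ·) := by
  induction fuel with
  | zero => intro l cur acc h; omega
  | succ n ih =>
    intro l cur acc h
    cases l with
    | nil =>
      simp [PySem.Chars.splitOn.go, List.splitOn]
    | cons c rest =>
      unfold PySem.Chars.splitOn.go
      by_cases hc : c = '.'
      · subst hc
        have hpre : ['.'].isPrefixOf ('.' :: rest) = true := by
          simp [List.isPrefixOf]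
        simp only [hpre, if_true]
        rw [ih _ _ _ (by simpa using Nat.lt_of_succ_lt_succ h)]
        simp only [List.splitOn, List.splitOnP_cons]
        simp only [beq_self_eq_true, if_true, List.modifyHead]
        cases hrr : List.splitOnP (fun x => x == '.') rest <;> simp [hrr]
      · have hpre : ['.'].isPrefixOf (c :: rest) = false := by
          simp [List.isPrefixOf]
          exact fun hh => hc hh.symm
        simp only [hpre, Bool.false_eq_true, if_false]
        rw [ih _ _ _ (by simpa using Nat.lt_of_succ_lt_succ h)]
        simp only [List.splitOn, List.splitOnP_cons]
        have hc' : (c == '.') = false := by simp [hc]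
        rw [hc']
        simp only [Bool.false_eq_true, if_false, List.modifyHead_modifyHead]
        have hfg : (fun x => (c :: cur).reverse ++ x) = ((fun x => cur.reverse ++ x) ∘ List.cons c) := by
          funext x
          simp
        rw [hfg]

theorem pvSplitDot_eq (s : List Char) :
    PySem.Chars.splitOn s ['.'] = List.splitOn '.' s := by
  unfold PySem.Chars.splitOn
  rw [pvGo (s.length + 1) s [] [] (by omega)]
  cases hrr : List.splitOn '.' s <;> simp [List.modifyHead]

-- chunks produced by splitOnP contain no separator
theorem pvChunksP (p : Char → Bool) (xs : List Char) :
    ∀ l ∈ xs.splitOnP p, ∀ c ∈ l, p c = false := by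
  induction xs with
  | nil => intro l hl c hc; simp at hl; subst hl; simp at hc
  | cons a xs ih =>
    intro l hl c hc
    rw [List.splitOnP_cons] at hl
    by_cases hp : p a
    · rw [if_pos hp, List.mem_cons] at hl
      rcases hl with hl | hl
      · subst hl; simp at hc
      · exact ih l hl c hc
    · rw [if_neg hp] at hl
      rcases hr : xs.splitOnP p with _ | ⟨r0, rs⟩
      · exact absurd hr (List.splitOnP_ne_nil p xs)
      · rw [hr] at hl
        simp only [List.modifyHead, List.mem_cons] at hl
        rcases hl with hl | hl
        · subst hl
          rw [List.mem_cons] at hc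
          rcases hc with hc | hc
          · subst hc
            simpa using hp
          · exact ih r0 (by rw [hr]; exact List.mem_cons_self) c hc
        · exact ih l (by rw [hr]; exact List.mem_cons_of_mem _ hl) c hc

theorem pvChunks (xs : List Char) : ∀ l ∈ List.splitOn '.' xs, '.' ∉ l := by
  intro l hl hmem
  have := pvChunksP (· == '.') xs l (by simpa [List.splitOn] using hl) '.' hmem
  simp at this

theorem pvJoin_map (ps : List (List Char)) :
    PySem.Str.join "." (ps.map String.ofList) = String.ofList (PySem.Chars.join ['.'] ps) := by
  simp [PySem.Str.join, List.map_map, Function.comp_def, String.toList_ofList]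

theorem pvSplitDot_join (ps : List (List Char)) (hne : ps ≠ []) (hdf : ∀ l ∈ ps, '.' ∉ l) :
    pySplitDot (String.ofList (PySem.Chars.join ['.'] ps)) = ps.map String.ofList := by
  unfold pySplitDot
  rw [String.toList_ofList, pvSplitDot_eq]
  have hj : PySem.Chars.join ['.'] ps = ['.'].intercalate ps := rfl
  rw [hj, List.splitOn_intercalate ps '.' hdf hne]

-- port of _parent_number
def pvParentNumber (num : String) : Option String :=
  let parts := pySplitDot num
  if parts.length ≤ 1 then none
  else some (PySem.Str.join "." (PySem.List.slice parts none (some (-1))))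

-- the parent has one dotted part fewer (termination of pvWalk)
theorem pvParent_lt (num p : String) (h : pvParentNumber num = some p) :
    (pySplitDot p).length < (pySplitDot num).length := by
  unfold pvParentNumber at h
  by_cases hle : (pySplitDot num).length ≤ 1
  · simp [hle] at h
  · simp only [hle, if_false] at h
    have hps : pySplitDot num = (List.splitOn '.' num.toList).map String.ofList := by
      unfold pySplitDot; rw [pvSplitDot_eq]
    set qs := List.splitOn '.' num.toList with hqs
    have hlen : (pySplitDot num).length = qs.length := by rw [hps]; simp
    have h' : PySem.Str.join "." (PySem.List.slice (pySplitDot num) none (some (-1))) = p := by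
      injection h
    have hp : p = String.ofList (PySem.Chars.join ['.'] qs.dropLast) := by
      rw [← h', hps, PySem.List.slice_to_neg_one, ← List.map_dropLast, pvJoin_map]
    have hne : qs.dropLast ≠ [] := by
      have hdl : qs.dropLast.length = qs.length - 1 := by simp
      intro hnil
      rw [hnil] at hdl
      simp at hdl
      omega
    have hdf : ∀ l ∈ qs.dropLast, '.' ∉ l := fun l hl =>
      pvChunks num.toList l (List.dropLast_sublist qs |>.mem hl)
    rw [hp, pvSplitDot_join qs.dropLast hne hdf]
    simp only [List.length_map, List.length_dropLast]
    omega

-- port of A's while-loop (chain accumulates appends; A reverses at the end)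
def pvWalk (nodes_lookup : List (String × List (String × String)))
    (current : String) (chain : List String) : List String :=
  let chain' :=
    match pvLookup nodes_lookup current with
    | some nd => if nd = [] then chain
                 else chain ++ [PySem.Dict.getD (PySem.Dict.mk nd) "title" ""]
    | none => chain
  match h : pvParentNumber current with
  | none => chain'
  | some p => pvWalk nodes_lookup p chain'
termination_by (pySplitDot current).length
decreasing_by exact pvParent_lt current p h

def get_ancestor_titles (node_number : String) (nodes_lookup : List (String × List (String × String))) : List String :=
  (pvWalk nodes_lookup node_number []).reverse

-- ===== PORT B =====
def get_ancestor_titles_alt (node_number : String) (nodes_lookup : List (String × List (String × String))) : List String :=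
  let parts := pySplitDot node_number
  (PySem.List.pyRange 1 ((parts.length : Int) + 1)).foldl
    (fun chain i =>
      match pvLookup nodes_lookup (PySem.Str.join "." (PySem.List.slice parts none (some i))) with
      | some nd => if nd = [] then chain
                   else chain ++ [PySem.Dict.getD (PySem.Dict.mk nd) "title" ""]
      | none => chain) []

-- ===== PRECONDITION & SPEC =====
def Spec_get_ancestor_titles (node_number : String) (nodes_lookup : List (String × List (String × String))) (out : List String) : Prop := out = get_ancestor_titles_alt node_number nodes_lookup
instance (node_number : String) (nodes_lookup : List (String × List (String × String))) (out : List String) : Decidable (Spec_get_ancestor_titles node_number nodes_lookup out) := by unfold Spec_get_ancestor_titles; infer_instance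

-- ===== CLAIM (what is proved, stated in full; the proofs are below) =====
def Claim_equal_get_ancestor_titles : Prop := ∀ (node_number : String) (nodes_lookup : List (String × List (String × String))), Dom_get_ancestor_titles node_number nodes_lookup → Spec_get_ancestor_titles node_number nodes_lookup (get_ancestor_titles node_number nodes_lookup)

-- ===== LEMMAS AND PROOFS =====

-- the ≤1-element list of titles contributed by one node number
def pvTitleAt (lk : List (String × List (String × String))) (s : String) : List String :=
  match pvLookup lk s with
  | some nd => if nd = [] then [] else [PySem.Dict.getD (PySem.Dict.mk nd) "title" ""]
  | none => []

theorem pvStep_eq (lk : List (String × List (String × String))) (s : String) (chain : List String) :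
    (match pvLookup lk s with
     | some nd => if nd = [] then chain
                  else chain ++ [PySem.Dict.getD (PySem.Dict.mk nd) "title" ""]
     | none => chain) = chain ++ pvTitleAt lk s := by
  unfold pvTitleAt
  cases pvLookup lk s with
  | none => simp
  | some nd => by_cases h : nd = [] <;> simp [h]

theorem pvTitleAt_reverse (lk : List (String × List (String × String))) (s : String) :
    (pvTitleAt lk s).reverse = pvTitleAt lk s := by
  unfold pvTitleAt
  cases pvLookup lk s with
  | none => simp
  | some nd => by_cases h : nd = [] <;> simp [h]

-- titles collected by A's walk, leaf-first
def pvDesc (lk : List (String × List (String × String))) (ps : List (List Char)) : List String :=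
  if _h : ps = [] then []
  else pvTitleAt lk (String.ofList (PySem.Chars.join ['.'] ps)) ++ pvDesc lk ps.dropLast
termination_by ps.length
decreasing_by
  simp only [List.length_dropLast]
  have := List.length_pos_of_ne_nil _h
  omega

theorem pvWalk_join (lk : List (String × List (String × String))) :
    ∀ (n : Nat) (ps : List (List Char)), ps.length = n → ps ≠ [] → (∀ l ∈ ps, '.' ∉ l) →
    ∀ chain, pvWalk lk (String.ofList (PySem.Chars.join ['.'] ps)) chain = chain ++ pvDesc lk ps := by
  intro n
  induction n using Nat.strong_induction_on with
  | _ n ih =>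
    intro ps hn hne hdf chain
    unfold pvWalk
    rw [pvStep_eq]
    have hsd : pySplitDot (String.ofList (PySem.Chars.join ['.'] ps)) = ps.map String.ofList :=
      pvSplitDot_join ps hne hdf
    by_cases h1 : ps.length ≤ 1
    · have hparent : pvParentNumber (String.ofList (PySem.Chars.join ['.'] ps)) = none := by
        unfold pvParentNumber
        rw [hsd]
        simp [h1]
      split
      · have hdl : ps.dropLast = [] := by
          have h2 : ps.dropLast.length = ps.length - 1 := by simp
          have : ps.dropLast.length = 0 := by omega
          exact List.eq_nil_of_length_eq_zero this
        rw [pvDesc, dif_neg hne, hdl, pvDesc]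
        simp
      · next p heq =>
        rw [hparent] at heq
        exact absurd heq (by simp)
    · have hparent : pvParentNumber (String.ofList (PySem.Chars.join ['.'] ps)) =
          some (String.ofList (PySem.Chars.join ['.'] ps.dropLast)) := by
        unfold pvParentNumber
        rw [hsd]
        simp only [List.length_map, h1, if_false]
        rw [PySem.List.slice_to_neg_one, ← List.map_dropLast, pvJoin_map]
      split
      · next heq =>
        rw [hparent] at heq
        exact absurd heq (by simp)
      · next p heq =>
        rw [hparent] at heq
        have heq' : String.ofList (PySem.Chars.join ['.'] ps.dropLast) = p := by
          injection heq
        have hne' : ps.dropLast ≠ [] := by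
          have hdl : ps.dropLast.length = ps.length - 1 := by simp
          intro hnil
          rw [hnil] at hdl
          simp at hdl
          omega
        have hdf' : ∀ l ∈ ps.dropLast, '.' ∉ l := fun l hl => hdf l (List.dropLast_sublist ps |>.mem hl)
        rw [← heq']
        conv_rhs => rw [pvDesc, dif_neg hne]
        rw [ih ps.dropLast.length (by rw [List.length_dropLast]; omega) ps.dropLast rfl hne' hdf']
        simp

-- take commutes with dropLast when the index stays inside dropLast
theorem pvTake_dropLast {α : Type} {xs : List α} {k : Nat}
    (h : k ≤ xs.length - 1) : xs.dropLast.take k = xs.take k := by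
  rw [List.dropLast_eq_take, List.take_take]
  congr 1
  omega

-- the reversed leaf-first list is B's flatMap over ascending prefixes
theorem pvAsc (lk : List (String × List (String × String))) :
    ∀ (n : Nat) (ps : List (List Char)), ps.length = n →
    (pvDesc lk ps).reverse
      = (PySem.List.pyRange 1 ((ps.length : Int) + 1)).flatMap
          (fun i => pvTitleAt lk (PySem.Str.join "." (PySem.List.slice (ps.map String.ofList) none (some i)))) := by
  intro n
  induction n using Nat.strong_induction_on with
  | _ n ih =>
    intro ps hn
    by_cases hne : ps = []
    · subst hne
      rw [pvDesc]
      simp [PySem.List.pyRange_one_eq_nil]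
    · rw [pvDesc, dif_neg hne]
      have hpos : 0 < ps.length := List.length_pos_of_ne_nil hne
      have hrange : PySem.List.pyRange 1 ((ps.length : Int) + 1)
          = PySem.List.pyRange 1 (ps.length : Int) ++ [(ps.length : Int)] :=
        PySem.List.pyRange_one_succ_right (by exact_mod_cast hpos)
      rw [List.reverse_append, pvTitleAt_reverse,
          ih ps.dropLast.length (by rw [List.length_dropLast]; omega) ps.dropLast rfl,
          hrange, List.flatMap_append]
      congr 1
      · rw [List.length_dropLast]
        have hcast : ((ps.length - 1 : Nat) : Int) + 1 = (ps.length : Int) := by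
          push_cast [hpos]; omega
        rw [hcast]
        apply List.flatMap_congr  -- pointwise equality on members
        intro i hi
        rcases (PySem.List.mem_pyRange_one).mp hi with ⟨h1i, hin⟩
        have h0i : 0 ≤ i := by omega
        rw [PySem.List.slice_to _ h0i, PySem.List.slice_to _ h0i,
            List.map_dropLast, pvTake_dropLast]
        · simp
          omega
      · simp only [List.flatMap_cons, List.flatMap_nil, List.append_nil]
        rw [PySem.List.slice_to _ (by positivity)]
        have : (((ps.length : Int)).toNat) = ps.length := by simp
        rw [this, List.take_of_length_le (by simp)]
        rw [pvJoin_map]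

-- B's fold is the flatMap of pvTitleAt over the prefixes
theorem pvAlt_eq (nn : String) (lk : List (String × List (String × String))) :
    get_ancestor_titles_alt nn lk
      = (PySem.List.pyRange 1 (((pySplitDot nn).length : Int) + 1)).flatMap
          (fun i => pvTitleAt lk (PySem.Str.join "." (PySem.List.slice (pySplitDot nn) none (some i)))) := by
  unfold get_ancestor_titles_alt
  have hf : (fun (chain : List String) (i : Int) =>
      (match pvLookup lk (PySem.Str.join "." (PySem.List.slice (pySplitDot nn) none (some i))) with
       | some nd => if nd = [] then chain
                    else chain ++ [PySem.Dict.getD (PySem.Dict.mk nd) "title" ""]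
       | none => chain))
      = (fun chain i => chain ++ pvTitleAt lk (PySem.Str.join "." (PySem.List.slice (pySplitDot nn) none (some i)))) := by
    funext chain i
    exact pvStep_eq lk _ chain
  show List.foldl
      (fun chain i =>
        match pvLookup lk (PySem.Str.join "." (PySem.List.slice (pySplitDot nn) none (some i))) with
        | some nd => if nd = [] then chain
                     else chain ++ [PySem.Dict.getD (PySem.Dict.mk nd) "title" ""]
        | none => chain)
      [] (PySem.List.pyRange 1 (((pySplitDot nn).length : Int) + 1)) = _
  rw [hf, PySem.List.foldl_append_eq_flatMap]
  simp

-- ===== VERDICT (by name: the statement is the Claim_ definition above) =====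
theorem get_ancestor_titles_spec : Claim_equal_get_ancestor_titles := by
  unfold Claim_equal_get_ancestor_titles
  intro nn lk _dom
  unfold Spec_get_ancestor_titles get_ancestor_titles
  set qs := List.splitOn '.' nn.toList with hqs
  have hne : qs ≠ [] := List.splitOnP_ne_nil _ _
  have hdf : ∀ l ∈ qs, '.' ∉ l := pvChunks nn.toList
  have hnn : nn = String.ofList (PySem.Chars.join ['.'] qs) := by
    have : PySem.Chars.join ['.'] qs = ['.'].intercalate qs := rfl
    rw [this, hqs, List.intercalate_splitOn, String.ofList_toList]
  rw [hnn, pvWalk_join lk qs.length qs rfl hne hdf []]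
  rw [List.nil_append, pvAsc lk qs.length qs rfl, pvAlt_eq]
  rw [← hnn]
  have hsd : pySplitDot nn = qs.map String.ofList := by
    rw [hnn]; exact pvSplitDot_join qs hne hdf
  rw [hsd]
  simp
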